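-- pv_equiv track=rewrite | github.com/urban1raccoon/HOGteam01 | digital-twin/backend/services/geo.py | _normalize_minutes
-- ===== SOURCE A (Python) =====
-- from typing import Any, Dict, List, Sequence, Tuple
--
-- def _normalize_minutes(values: Sequence[int]) -> List[int]:
--     minutes: List[int] = []
--     for value in values:
--         try:
--             minute = int(value)
--         except (TypeError, ValueError):
--             continue
--         if 1 <= minute <= 60:
--             minutes.append(minute)
--
--     unique_sorted = sorted(set(minutes))
--     return unique_sorted[:4]
-- ===== SOURCE B (Python) =====
-- from typing import List, Sequence
--
--
-- def _normalize_minutes(values: Sequence[int]) -> List[int]: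
--     # Counting/presence-table approach: mark which minutes 1..60 occur,
--     # then read off the first four marked minutes in ascending order.
--     seen = [False] * 61
--     for value in values:
--         try:
--             minute = int(value)
--         except (TypeError, ValueError):
--             continue
--         if 1 <= minute <= 60:
--             seen[minute] = True
--     return [m for m in range(1, 61) if seen[m]][:4]
-- ===== Notes on version B (the rewrite author's own statement) =====
-- stated objective: alternative
-- what changed: Replaces the collect-then-set-then-sort-then-slice pipeline with a fixed presence table over the bounded range 1..60: one pass marks seen minutes, then the first four marked minutes are read off in ascending order, so no set and no sort are built.
import Mathlib
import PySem

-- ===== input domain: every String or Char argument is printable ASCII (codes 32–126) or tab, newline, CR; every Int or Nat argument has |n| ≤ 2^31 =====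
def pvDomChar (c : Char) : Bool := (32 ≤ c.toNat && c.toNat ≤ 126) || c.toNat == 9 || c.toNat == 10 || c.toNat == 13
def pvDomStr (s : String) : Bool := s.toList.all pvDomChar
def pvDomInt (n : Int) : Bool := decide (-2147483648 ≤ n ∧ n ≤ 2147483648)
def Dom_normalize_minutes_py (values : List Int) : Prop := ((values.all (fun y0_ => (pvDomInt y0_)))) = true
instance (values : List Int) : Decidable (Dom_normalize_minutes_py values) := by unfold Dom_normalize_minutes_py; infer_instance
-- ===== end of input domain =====

-- B replaces the set-then-sort pipeline with a presence table over the bounded range 1..60 (alternative decomposition, same cost class).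

-- ===== PORT A =====
-- int(value) on an int is the identity and raises nothing, so the try/except is a no-op on List Int.
def normalize_minutes_py (values : List Int) : List Int :=
  let minutes : List Int :=
    values.foldl (fun acc value => if 1 ≤ value ∧ value ≤ 60 then acc ++ [value] else acc) []
  let unique_sorted := PySem.List.sorted (PySem.Set.ofList minutes) (fun x => x) false
  unique_sorted.take 4   -- unique_sorted[:4]

-- ===== PORT B =====
def normalize_minutes_py_alt (values : List Int) : List Int :=
  let seen : List Bool :=
    values.foldl (fun s value => if 1 ≤ value ∧ value ≤ 60 then PySem.List.pySetD s value true else s)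
      (List.replicate 61 false)
  (((PySem.List.pyRange 1 61 1).filter (fun m => PySem.List.pyGetD seen m false)).take 4)

-- ===== PRECONDITION & SPEC =====
def Spec_normalize_minutes_py (values : List Int) (out : List Int) : Prop := out = normalize_minutes_py_alt values
instance (values : List Int) (out : List Int) : Decidable (Spec_normalize_minutes_py values out) := by unfold Spec_normalize_minutes_py; infer_instance

-- ===== CLAIM (what is proved, stated in full; the proofs are below) =====
def Claim_equal_normalize_minutes_py : Prop := ∀ (values : List Int), Dom_normalize_minutes_py values → Spec_normalize_minutes_py values (normalize_minutes_py values)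

-- ===== LEMMAS AND PROOFS =====

-- Reading the seen table at m ∈ [1,60] is membership of m among the in-range values.
lemma seen_get (values : List Int) (s : List Bool) (hlen : s.length = 61)
    (m : Int) (h1 : 1 ≤ m) (h2 : m ≤ 60) :
    PySem.List.pyGetD (values.foldl (fun s value => if 1 ≤ value ∧ value ≤ 60 then PySem.List.pySetD s value true else s) s) m false
      = (PySem.List.pyGetD s m false || decide (m ∈ values.filter (fun v => decide (1 ≤ v ∧ v ≤ 60)))) := by
  induction values generalizing s with
  | nil => simp
  | cons v vs ih =>
    simp only [List.foldl_cons]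
    by_cases hv : 1 ≤ v ∧ v ≤ 60
    · rw [if_pos hv, ih _ (by simpa [PySem.List.length_pySetD] using hlen)]
      have hvn : (0:Int) ≤ v := by omega
      have hmn : (0:Int) ≤ m := by omega
      rw [PySem.List.pySetD_of_nonneg s true hvn, PySem.List.pyGetD_of_nonneg _ _ hmn,
          PySem.List.pyGetD_of_nonneg _ _ hmn]
      by_cases hmv : m = v
      · subst hmv
        have hlt : m.toNat < s.length := by omega
        have hset : (s.set m.toNat true)[m.toNat]? = some true := by
          simp [hlt]
        simp [List.getD_eq_getElem?_getD, hset, hv]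
      · have hset : (s.set v.toNat true)[m.toNat]? = s[m.toNat]? :=
          List.getElem?_set_ne (by omega)
        simp [List.getD_eq_getElem?_getD, hset, hmv, hv]
    · rw [if_neg hv, ih _ hlen]
      simp [hv]

-- Sorting the set of in-range minutes equals filtering the ascending range 1..60 by membership.
lemma sorted_set_eq_filter_range (minutes : List Int)
    (hmem : ∀ m ∈ minutes, 1 ≤ m ∧ m ≤ 60) :
    PySem.List.sorted (PySem.Set.ofList minutes) (fun x => x) false
      = (PySem.List.pyRange 1 61 1).filter (fun m => decide (m ∈ minutes)) := by
  apply PySem.List.sorted_eq_of_perm_of_pairwise_lt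
  · rw [List.perm_ext_iff_of_nodup ((PySem.List.nodup_pyRange_one 1 61).filter _)
        (PySem.Set.nodup_ofList minutes)]
    intro a
    simp [PySem.Set.mem_ofList, PySem.List.mem_pyRange_one]
    intro ha
    have := hmem a ha
    omega
  · exact (PySem.List.pairwise_lt_pyRange_one 1 61).filter _

-- ===== VERDICT (by name: the statement is the Claim_ definition above) =====
theorem normalize_minutes_py_spec : Claim_equal_normalize_minutes_py := by
  intro values _
  unfold Spec_normalize_minutes_py normalize_minutes_py normalize_minutes_py_alt
  simp only []
  rw [PySem.List.foldl_append_ite_eq_filter (fun value => 1 ≤ value ∧ value ≤ 60)]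
  rw [List.nil_append]
  rw [sorted_set_eq_filter_range _ (by intro m hm; simpa using (List.mem_filter.mp hm).2)]
  congr 1
  apply List.filter_congr
  intro m hm
  have hm' := (PySem.List.mem_pyRange_one).mp hm
  rw [seen_get _ _ (by simp) m hm'.1 (by omega),
      PySem.List.pyGetD_of_nonneg _ _ (by omega : (0:Int) ≤ m)]
  simp only [List.getD_eq_getElem?_getD, List.getElem?_replicate]
  simp [List.mem_filter, hm'.1, show m ≤ 60 by omega, show m.toNat < 61 by omega]
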